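-- pv_equiv track=rewrite | github.com/eliottcassidy2000/math | 04-computation/p17_test.py | find_orbit_representatives
-- ===== SOURCE A (Python) =====
-- import math
--
-- def all_circulant_tournaments(n):
--     pairs, used = [], set()
--     for a in range(1, n):
--         if a not in used:
--             b = n - a
--             if a == b: return []
--             pairs.append((a, b)); used.add(a); used.add(b)
--     results = []
--     for bits in range(2 ** len(pairs)):
--         S = [a if (bits >> i) & 1 else b for i, (a, b) in enumerate(pairs)]
--         results.append(tuple(sorted(S)))
--     return results
--
-- def multiplicative_orbit(p, S):
--     """Compute the Z_p^* orbit of connection set S."""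
--     S_set = frozenset(S)
--     orbit = {S_set}
--     for a in range(2, p):
--         if math.gcd(a, p) != 1:
--             continue
--         new_S = frozenset((a * s) % p for s in S)
--         orbit.add(new_S)
--     return orbit
--
-- def find_orbit_representatives(p):
--     """Find one representative per Z_p^* orbit of connection sets."""
--     all_S = all_circulant_tournaments(p)
--     seen = set()
--     reps = []
--     for S in all_S:
--         S_frozen = frozenset(S)
--         if S_frozen in seen:
--             continue
--         orbit = multiplicative_orbit(p, S)
--         reps.append(tuple(sorted(S)))
--         for member in orbit:
--             seen.add(member)
--     return reps
-- ===== SOURCE B (Python) =====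
-- import math
--
-- def all_circulant_tournaments(n):
--     pairs, used = [], set()
--     for a in range(1, n):
--         if a not in used:
--             b = n - a
--             if a == b: return []
--             pairs.append((a, b)); used.add(a); used.add(b)
--     results = []
--     for bits in range(2 ** len(pairs)):
--         S = [a if (bits >> i) & 1 else b for i, (a, b) in enumerate(pairs)]
--         results.append(tuple(sorted(S)))
--     return results
--
-- def find_orbit_representatives(p):
--     """Find one representative per Z_p^* orbit of connection sets by
--     canonical-label indexing: each set S is reduced to the lexicographically
--     least sorted image of S under the units of Z_p (a canonical label of its
--     orbit), so a first-seen test on single labels replaces orbit expansion."""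
--     all_S = all_circulant_tournaments(p)
--     if not all_S:
--         return []
--     units = [a for a in range(1, p) if math.gcd(a, p) == 1]
--     tables = [[(a * s) % p for s in range(p)] for a in units]
--     seen = set()
--     reps = []
--     for S in all_S:
--         key = tuple(min((sorted(map(t.__getitem__, S)) for t in tables),
--                         default=sorted(S)))
--         if key not in seen:
--             seen.add(key)
--             reps.append(tuple(sorted(S)))
--     return reps
-- ===== Notes on version B (the rewrite author's own statement) =====
-- stated objective: alternative
-- what changed: B deduplicates by a canonical orbit label (the lexicographically least sorted unit-multiple image of each connection set), so one key per set replaces A's explicit orbit expansion and marking of every orbit member in the seen-set.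
import Mathlib
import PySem

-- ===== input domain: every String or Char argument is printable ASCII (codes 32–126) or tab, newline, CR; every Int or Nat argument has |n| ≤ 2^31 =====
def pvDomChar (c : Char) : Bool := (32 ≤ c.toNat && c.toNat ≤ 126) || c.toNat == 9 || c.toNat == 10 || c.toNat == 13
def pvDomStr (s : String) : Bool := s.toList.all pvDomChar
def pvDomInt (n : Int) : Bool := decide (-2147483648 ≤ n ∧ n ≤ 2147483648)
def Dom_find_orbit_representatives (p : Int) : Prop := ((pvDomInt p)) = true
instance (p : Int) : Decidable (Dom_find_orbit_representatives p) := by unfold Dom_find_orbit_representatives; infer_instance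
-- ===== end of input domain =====

-- B replaces A's explicit orbit expansion and member-marking with canonical-label indexing:
-- each connection set is reduced to the lexicographically least sorted unit-multiple image,
-- and representatives are deduplicated by that single canonical key (objective: alternative).

-- ===== PORT A =====
-- Python frozenset of ints, represented canonically as the strictly increasing list of its
-- distinct elements, so that Lean list equality coincides with Python frozenset equality.
-- (tuple(sorted(set(l))) computes the same list, so B's canonical labels reuse this helper.)
def pyFrozenset (l : List Int) : List Int :=
  PySem.List.sorted (PySem.List.dedup l) (fun x => x) false

-- first loop of all_circulant_tournaments (early `return []` modelled by `none`).
-- `used` is a purely internal membership set (never iterated, never returned), so it is backed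
-- by Std.HashSet, whose contains/insert agree with Python's hash-set `in`/`add`; `pairs` is an
-- Array so that `push` is Python's O(1) `list.append` (same elements, same order).
def pvPairsLoop (n : Int) : List Int → Array (Int × Int) → Std.HashSet Int → Option (Array (Int × Int))
  | [], pairs, _ => some pairs
  | a :: rest, pairs, used =>
    if used.contains a then pvPairsLoop n rest pairs used
    else
      let b := n - a
      if a = b then none
      else pvPairsLoop n rest (pairs.push (a, b)) ((used.insert a).insert b)

def all_circulant_tournaments (n : Int) : List (List Int) :=
  match pvPairsLoop n (PySem.List.pyRange 1 n 1) #[] Std.HashSet.emptyWithCapacity with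
  | none => []
  | some pairsArr =>
    let pairs := pairsArr.toList
    (PySem.List.pyRange 0 ((2 : Int) ^ pairs.length) 1).foldl
      (fun results bits =>
        results ++ [PySem.List.sorted
          ((PySem.List.enumerate pairs).map (fun iq =>
            -- bits ≥ 0 here, so `(bits >> i) & 1` is truthy iff it is ≠ 0
            if PySem.Int.band (bits >>> iq.1.toNat) 1 ≠ 0 then iq.2.1 else iq.2.2))
          (fun x => x) false]) []

def multiplicative_orbit (p : Int) (S : List Int) : PySem.Set (List Int) :=
  let S_set := pyFrozenset S
  (PySem.List.pyRange 2 p 1).foldl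
    (fun orbit a =>
      if Int.gcd a p ≠ 1 then orbit
      else PySem.Set.add orbit (pyFrozenset (S.map (fun s => PySem.Int.mod (a * s) p))))
    (PySem.Set.ofList [S_set])

def find_orbit_representatives (p : Int) : List (List Int) :=
  let all_S := all_circulant_tournaments p
  (all_S.foldl
    (fun st S =>
      if PySem.Set.contains st.1 (pyFrozenset S) then st
      else
        let orbit := multiplicative_orbit p S
        (orbit.foldl (fun se m => PySem.Set.add se m) st.1,
         st.2 ++ [PySem.List.sorted S (fun x => x) false]))
    (PySem.Set.empty, [])).2

-- ===== PORT B =====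
def find_orbit_representatives_alt (p : Int) : List (List Int) :=
  let all_S := all_circulant_tournaments p
  if all_S = [] then []
  else
  let units := (PySem.List.pyRange 1 p 1).filter (fun a => Int.gcd a p == 1)
  let tables := units.map (fun a =>
    (PySem.List.pyRange 0 p 1).map (fun s => PySem.Int.mod (a * s) p))
  (all_S.foldl
    (fun st S =>
      -- key = tuple(min((sorted(map(t.__getitem__, S)) for t in tables), default=sorted(S)));
      -- lists compare like Python tuples (the lexicographic order on List Int); S's elements
      -- always lie in [0, p), so t[s] never raises and pyGetD's default is never read
      let key := PySem.List.minD
        (tables.map (fun t =>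
          PySem.List.sorted (S.map (fun s => PySem.List.pyGetD t s 0)) (fun x => x) false))
        (fun x => x)
        (PySem.List.sorted S (fun x => x) false)
      if PySem.Set.contains st.1 key then st
      else (PySem.Set.add st.1 key, st.2 ++ [PySem.List.sorted S (fun x => x) false]))
    ((PySem.Set.empty : PySem.Set (List Int)), ([] : List (List Int)))).2

-- ===== PRECONDITION & SPEC =====
def Spec_find_orbit_representatives (p : Int) (out : List (List Int)) : Prop := out = find_orbit_representatives_alt p
instance (p : Int) (out : List (List Int)) : Decidable (Spec_find_orbit_representatives p out) := by unfold Spec_find_orbit_representatives; infer_instance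

-- ===== CLAIM (what is proved, stated in full; the proofs are below) =====
def Claim_equal_find_orbit_representatives : Prop := ∀ (p : Int), Dom_find_orbit_representatives p → Spec_find_orbit_representatives p (find_orbit_representatives p)

-- ===== LEMMAS AND PROOFS =====

-- the unit list, the image of a list under one unit, and B's canonical key
def pvUnits (p : Int) : List Int := (PySem.List.pyRange 1 p 1).filter (fun a => Int.gcd a p == 1)

def pvImg (p a : Int) (r : List Int) : List Int :=
  pyFrozenset (r.map (fun x => PySem.Int.mod (a * x) p))

def pvCanon (p : Int) (S : List Int) : List Int :=
  PySem.List.minD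
    (((pvUnits p).map (fun a =>
        (PySem.List.pyRange 0 p 1).map (fun s => PySem.Int.mod (a * s) p))).map
      (fun t =>
        PySem.List.sorted (S.map (fun s => PySem.List.pyGetD t s 0)) (fun x => x) false))
    (fun x => x)
    (PySem.List.sorted S (fun x => x) false)

lemma mem_pyFrozenset {z : Int} {l : List Int} : z ∈ pyFrozenset l ↔ z ∈ l := by
  unfold pyFrozenset
  rw [PySem.List.mem_sorted, PySem.List.mem_dedup]

-- frozenset equality is membership equality
lemma pyFrozenset_eq_iff {X Y : List Int} :
    pyFrozenset X = pyFrozenset Y ↔ ∀ z, z ∈ X ↔ z ∈ Y := by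
  constructor
  · intro h z
    rw [← mem_pyFrozenset (l := X), h, mem_pyFrozenset]
  · intro h
    unfold pyFrozenset
    apply PySem.List.sorted_eq_sorted_of_perm _ _ _ (fun a b hab => hab)
    rw [List.perm_ext_iff_of_nodup (PySem.List.nodup_dedup X) (PySem.List.nodup_dedup Y)]
    intro a
    rw [PySem.List.mem_dedup, PySem.List.mem_dedup]
    exact h a

lemma sorted_eq_pyFrozenset_of_nodup {l : List Int} (h : l.Nodup) :
    PySem.List.sorted l (fun x => x) false = pyFrozenset l := by
  unfold pyFrozenset
  apply PySem.List.sorted_eq_sorted_of_perm _ _ _ (fun a b hab => hab)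
  rw [List.perm_ext_iff_of_nodup h (PySem.List.nodup_dedup l)]
  intro a
  rw [PySem.List.mem_dedup]

lemma pvImg_congr {p a : Int} {r r' : List Int} (h : ∀ z, z ∈ r ↔ z ∈ r') :
    pvImg p a r = pvImg p a r' := by
  unfold pvImg
  rw [pyFrozenset_eq_iff]
  intro z
  simp only [List.mem_map]
  constructor
  · rintro ⟨x, hx, rfl⟩; exact ⟨x, (h x).mp hx, rfl⟩
  · rintro ⟨x, hx, rfl⟩; exact ⟨x, (h x).mpr hx, rfl⟩

lemma pvImg_one {p : Int} (hp : 0 < p) {r : List Int} (hb : ∀ x ∈ r, 0 ≤ x ∧ x < p) :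
    pvImg p 1 r = pyFrozenset r := by
  unfold pvImg
  congr 1
  conv_rhs => rw [← List.map_id r]
  apply List.map_congr_left
  intro x hx
  have := hb x hx
  rw [one_mul, PySem.Int.mod_eq_emod_of_pos hp, Int.emod_eq_of_lt (by omega) (by omega)]; rfl

lemma pvImg_emod {p : Int} (hp : 0 < p) (a : Int) (r : List Int) :
    pvImg p (a % p) r = pvImg p a r := by
  unfold pvImg
  congr 1
  apply List.map_congr_left
  intro x _
  rw [PySem.Int.mod_eq_emod_of_pos hp, PySem.Int.mod_eq_emod_of_pos hp,
    Int.mul_emod (a % p) x p, Int.emod_emod_of_dvd a dvd_rfl, ← Int.mul_emod]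

lemma pv_mod_mul_mod {p : Int} (hp : 0 < p) (a b x : Int) :
    PySem.Int.mod (a * PySem.Int.mod (b * x) p) p = PySem.Int.mod (a * b * x) p := by
  rw [PySem.Int.mod_eq_emod_of_pos hp, PySem.Int.mod_eq_emod_of_pos hp,
    PySem.Int.mod_eq_emod_of_pos hp, Int.mul_emod a _ p, Int.emod_emod_of_dvd _ dvd_rfl,
    ← Int.mul_emod, mul_assoc]

lemma pvImg_comp {p : Int} (hp : 0 < p) (a b : Int) (r : List Int) :
    pvImg p a (pvImg p b r) = pvImg p (a * b) r := by
  unfold pvImg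
  rw [pyFrozenset_eq_iff]
  intro z
  simp only [List.mem_map, mem_pyFrozenset]
  constructor
  · rintro ⟨w, ⟨x, hx, rfl⟩, rfl⟩
    exact ⟨x, hx, (pv_mod_mul_mod hp a b x).symm⟩
  · rintro ⟨x, hx, rfl⟩
    exact ⟨PySem.Int.mod (b * x) p, ⟨x, hx, rfl⟩, pv_mod_mul_mod hp a b x⟩

lemma mem_pvUnits {p a : Int} : a ∈ pvUnits p ↔ (1 ≤ a ∧ a < p) ∧ Int.gcd a p = 1 := by
  unfold pvUnits
  rw [List.mem_filter, PySem.List.mem_pyRange_one]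
  simp

-- ------- shape of all_circulant_tournaments' output: bounds and distinctness -------

-- the flattened components of the pair list
def pvComps (ps : List (Int × Int)) : List Int := ps.flatMap (fun q => [q.1, q.2])

lemma mem_pvComps {q : Int × Int} {ps : List (Int × Int)} (h : q ∈ ps) :
    q.1 ∈ pvComps ps ∧ q.2 ∈ pvComps ps := by
  unfold pvComps
  constructor <;> (rw [List.mem_flatMap]; exact ⟨q, h, by simp⟩)

-- every pair produced by pvPairsLoop has both components in [1, n)
lemma pvPairsLoop_bounds (n : Int) (l : List Int) :
    ∀ (pairs : Array (Int × Int)) (used : Std.HashSet Int) ps, (∀ a ∈ l, 1 ≤ a ∧ a < n) →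
      (∀ q ∈ pairs.toList, 1 ≤ q.1 ∧ q.1 < n ∧ 1 ≤ q.2 ∧ q.2 < n) →
      pvPairsLoop n l pairs used = some ps →
      ∀ q ∈ ps.toList, 1 ≤ q.1 ∧ q.1 < n ∧ 1 ≤ q.2 ∧ q.2 < n := by
  induction l with
  | nil => intro pairs used ps _ hp heq; cases heq; exact hp
  | cons a rest ih =>
    intro pairs used ps hl hp heq
    have ha := hl a (List.mem_cons_self ..)
    have hrest : ∀ x ∈ rest, 1 ≤ x ∧ x < n := fun x hx => hl x (List.mem_cons_of_mem _ hx)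
    unfold pvPairsLoop at heq
    by_cases hc : used.contains a = true
    · simp only [hc, if_true] at heq
      exact ih pairs used ps hrest hp heq
    · simp only [hc, Bool.false_eq_true, if_false] at heq
      by_cases hab : a = n - a
      · rw [if_pos hab] at heq; exact absurd heq (by simp)
      · rw [if_neg hab] at heq
        refine ih _ _ ps hrest ?_ heq
        intro q hq
        rw [Array.toList_push] at hq
        rcases List.mem_append.mp hq with h | h
        · exact hp q h
        · simp only [List.mem_singleton] at h
          subst h; constructor <;> [exact ha.1; refine ⟨?_, ?_, ?_⟩] <;> omega

-- the components of the produced pairs are pairwise distinct (Python's `used` set guarantees it)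
lemma pvPairsLoop_nodup (n : Int) (l : List Int) :
    ∀ (pairs : Array (Int × Int)) (used : Std.HashSet Int) ps,
      (∀ x : Int, used.contains x = true ↔ x ∈ pvComps pairs.toList) →
      (pvComps pairs.toList).Nodup →
      (∀ q ∈ pairs.toList, q.2 = n - q.1) →
      pvPairsLoop n l pairs used = some ps →
      (pvComps ps.toList).Nodup := by
  induction l with
  | nil => intro pairs used ps _ hnd _ heq; cases heq; exact hnd
  | cons a rest ih =>
    intro pairs used ps hused hnd hpart heq
    unfold pvPairsLoop at heq
    by_cases hc : used.contains a = true
    · simp only [hc, if_true] at heq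
      exact ih pairs used ps hused hnd hpart heq
    · simp only [hc, Bool.false_eq_true, if_false] at heq
      by_cases hab : a = n - a
      · rw [if_pos hab] at heq; exact absurd heq (by simp)
      · rw [if_neg hab] at heq
        have hanotin : a ∉ pvComps pairs.toList := by
          intro hmem
          rw [← hused a] at hmem
          exact absurd hmem hc
        have hbnotin : (n - a) ∉ pvComps pairs.toList := by
          intro hmem
          unfold pvComps at hmem
          rw [List.mem_flatMap] at hmem
          obtain ⟨q, hq, hcomp⟩ := hmem
          have hq2 := hpart q hq
          have hqc := mem_pvComps hq
          simp only [List.mem_cons, List.not_mem_nil, or_false] at hcomp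
          rcases hcomp with h1 | h1
          · -- n - a = q.1, so q.2 = n - q.1 = a ∈ comps
            have hq2a : q.2 = a := by omega
            exact hanotin (hq2a ▸ hqc.2)
          · -- n - a = q.2 = n - q.1, so q.1 = a ∈ comps
            have hq1a : q.1 = a := by omega
            exact hanotin (hq1a ▸ hqc.1)
        have hcomps_push : pvComps (pairs.push (a, n - a)).toList
            = pvComps pairs.toList ++ [a, n - a] := by
          unfold pvComps
          rw [Array.toList_push, List.flatMap_append]
          simp
        refine ih _ _ ps ?_ ?_ ?_ heq
        · intro x
          rw [Std.HashSet.contains_insert, Std.HashSet.contains_insert, hcomps_push]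
          simp only [Bool.or_eq_true, beq_iff_eq, hused x, List.mem_append,
            List.mem_cons, List.not_mem_nil, or_false]
          tauto
        · rw [hcomps_push, List.nodup_append]
          refine ⟨hnd, by simp [hab], ?_⟩
          intro x hx y hy
          rcases List.mem_cons.mp hy with rfl | hy2
          · exact fun hxy => hanotin (hxy ▸ hx)
          · rcases List.mem_cons.mp hy2 with rfl | hy3
            · exact fun hxy => hbnotin (hxy ▸ hx)
            · exact absurd hy3 (List.not_mem_nil)
        · intro q hq
          rw [Array.toList_push] at hq
          rcases List.mem_append.mp hq with h | h
          · exact hpart q h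
          · simp only [List.mem_singleton] at h; subst h; rfl

-- every element of every connection set lies in [1, p)
lemma all_S_bounds {p : Int} {S : List Int} (hS : S ∈ all_circulant_tournaments p) :
    ∀ x ∈ S, 1 ≤ x ∧ x < p := by
  unfold all_circulant_tournaments at hS
  cases heq : pvPairsLoop p (PySem.List.pyRange 1 p 1) #[] (Std.HashSet.emptyWithCapacity) with
  | none => rw [heq] at hS; simp at hS
  | some pairsArr =>
    rw [heq] at hS
    dsimp only at hS
    rw [PySem.List.foldl_append_singleton_eq_map] at hS
    simp only [List.nil_append, List.mem_map] at hS
    obtain ⟨bits, -, rfl⟩ := hS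
    intro x hx
    rw [PySem.List.mem_sorted] at hx
    simp only [List.mem_map] at hx
    obtain ⟨⟨i, q⟩, hiq, rfl⟩ := hx
    have hqmem : q ∈ pairsArr.toList := by
      rw [PySem.List.mem_enumerate_iff] at hiq
      obtain ⟨k, hk, hpq⟩ := hiq
      cases hpq
      exact List.getElem_mem hk
    have hb := pvPairsLoop_bounds p _ #[] Std.HashSet.emptyWithCapacity pairsArr
      (fun a ha => PySem.List.mem_pyRange_one.mp ha) (by simp) heq q hqmem
    dsimp only
    split <;> omega

-- components pairwise distinct across pairs
lemma pairwise_of_pvComps_nodup :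
    ∀ (ps : List (Int × Int)), (pvComps ps).Nodup →
      ps.Pairwise (fun q q' => q.1 ≠ q'.1 ∧ q.1 ≠ q'.2 ∧ q.2 ≠ q'.1 ∧ q.2 ≠ q'.2) := by
  intro ps
  induction ps with
  | nil => intro _; exact List.Pairwise.nil
  | cons q t ih =>
    intro hnd
    have hexp : pvComps (q :: t) = q.1 :: q.2 :: pvComps t := by
      unfold pvComps; simp
    rw [hexp, List.nodup_cons, List.nodup_cons] at hnd
    obtain ⟨h1, h2, h3⟩ := hnd
    simp only [List.mem_cons] at h1
    refine List.Pairwise.cons ?_ (ih h3)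
    intro q' hq'
    have hc := mem_pvComps hq'
    refine ⟨?_, ?_, ?_, ?_⟩ <;> intro hcontra
    · exact h1 (Or.inr (hcontra ▸ hc.1))
    · exact h1 (Or.inr (hcontra ▸ hc.2))
    · exact h2 (hcontra ▸ hc.1)
    · exact h2 (hcontra ▸ hc.2)

-- every connection set is duplicate-free
lemma all_S_nodup {p : Int} {S : List Int} (hS : S ∈ all_circulant_tournaments p) :
    S.Nodup := by
  unfold all_circulant_tournaments at hS
  cases heq : pvPairsLoop p (PySem.List.pyRange 1 p 1) #[] (Std.HashSet.emptyWithCapacity) with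
  | none => rw [heq] at hS; simp at hS
  | some pairsArr =>
    rw [heq] at hS
    dsimp only at hS
    rw [PySem.List.foldl_append_singleton_eq_map] at hS
    simp only [List.nil_append, List.mem_map] at hS
    obtain ⟨bits, -, rfl⟩ := hS
    have hnd : (pvComps pairsArr.toList).Nodup := by
      refine pvPairsLoop_nodup p _ #[] Std.HashSet.emptyWithCapacity pairsArr ?_ ?_ ?_ heq
      · intro x; simp [pvComps]
      · simp [pvComps]
      · simp
    have hpw := pairwise_of_pvComps_nodup _ hnd
    rw [← PySem.List.map_snd_enumerate pairsArr.toList 0, List.pairwise_map] at hpw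
    apply (PySem.List.sorted_perm _ _ _).nodup_iff.mpr
    rw [List.Nodup, List.pairwise_map]
    refine hpw.imp ?_
    intro iq jq h
    dsimp only
    split <;> split <;> [exact h.1; exact h.2.1; exact h.2.2.1; exact h.2.2.2]

-- a unit multiplies injectively mod p, so images of duplicate-free lists are duplicate-free
lemma nodup_image {p a : Int} (hp : 2 ≤ p) (hg : Int.gcd a p = 1) {S : List Int}
    (hnd : S.Nodup) (hb : ∀ x ∈ S, 0 ≤ x ∧ x < p) :
    (S.map (fun s => PySem.Int.mod (a * s) p)).Nodup := by
  refine List.Nodup.map_on ?_ hnd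
  intro x hx y hy hxy
  have hbx := hb x hx
  have hby := hb y hy
  rw [PySem.Int.mod_eq_emod_of_pos (by omega), PySem.Int.mod_eq_emod_of_pos (by omega)] at hxy
  have hdvd : p ∣ (x - y) * a := by
    have h1 : p ∣ a * x - a * y := Int.ModEq.dvd (Int.ModEq.symm hxy)
    have h2 : a * x - a * y = (x - y) * a := by ring
    rwa [h2] at h1
  have hco : IsCoprime p a := (Int.isCoprime_iff_gcd_eq_one.mpr hg).symm
  have hzero : x - y = 0 :=
    Int.eq_zero_of_abs_lt_dvd (hco.dvd_of_dvd_mul_right hdvd) (by rw [abs_lt]; omega)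
  omega

-- membership in A's multiplicative_orbit
lemma mem_multiplicative_orbit (p : Int) (S T : List Int) :
    T ∈ multiplicative_orbit p S ↔
      T = pyFrozenset S ∨
        ∃ a, a ∈ PySem.List.pyRange 2 p 1 ∧ Int.gcd a p = 1 ∧
          T = pyFrozenset (S.map (fun s => PySem.Int.mod (a * s) p)) := by
  unfold multiplicative_orbit
  have main : ∀ (l : List Int) (s₀ : PySem.Set (List Int)),
      T ∈ l.foldl (fun orbit a =>
          if Int.gcd a p ≠ 1 then orbit
          else PySem.Set.add orbit (pyFrozenset (S.map (fun s => PySem.Int.mod (a * s) p)))) s₀ ↔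
        T ∈ s₀ ∨ ∃ a, a ∈ l ∧ Int.gcd a p = 1 ∧
          T = pyFrozenset (S.map (fun s => PySem.Int.mod (a * s) p)) := by
    intro l
    induction l with
    | nil => simp
    | cons a rest ih =>
      intro s₀
      simp only [List.foldl_cons]
      by_cases hg : Int.gcd a p = 1
      · simp only [hg, ne_eq, not_true_eq_false, if_false]
        rw [ih, PySem.Set.mem_add]
        constructor
        · rintro (⟨h | h⟩ | ⟨b, hb, hg2, rfl⟩)
          · exact Or.inl h
          · exact Or.inr ⟨a, List.mem_cons_self .., hg, h⟩
          · exact Or.inr ⟨b, List.mem_cons_of_mem _ hb, hg2, rfl⟩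
        · rintro (h | ⟨b, hb, hg2, rfl⟩)
          · exact Or.inl (Or.inl h)
          · rcases List.mem_cons.mp hb with rfl | hb
            · exact Or.inl (Or.inr rfl)
            · exact Or.inr ⟨b, hb, hg2, rfl⟩
      · simp only [hg, ne_eq, not_false_eq_true, if_true]
        rw [ih]
        constructor
        · rintro (h | ⟨b, hb, hg2, rfl⟩)
          · exact Or.inl h
          · exact Or.inr ⟨b, List.mem_cons_of_mem _ hb, hg2, rfl⟩
        · rintro (h | ⟨b, hb, hg2, rfl⟩)
          · exact Or.inl h
          · rcases List.mem_cons.mp hb with rfl | hb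
            · exact absurd hg2 hg
            · exact Or.inr ⟨b, hb, hg2, rfl⟩
  rw [main]
  have : T ∈ PySem.Set.ofList [pyFrozenset S] ↔ T = pyFrozenset S := by
    rw [PySem.Set.mem_ofList]; simp
  rw [this]

-- for S with elements in [1, p): A's orbit of S = the images of (sorted S) under all units
lemma orbit_eq_images {p : Int} {S : List Int} (hp : 2 ≤ p)
    (hS : ∀ x ∈ S, 1 ≤ x ∧ x < p) (T : List Int) :
    T ∈ multiplicative_orbit p S ↔
      ∃ a ∈ pvUnits p, T = pvImg p a (PySem.List.sorted S (fun x => x) false) := by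
  have himg : ∀ a : Int, pvImg p a (PySem.List.sorted S (fun x => x) false) =
      pyFrozenset (S.map (fun s => PySem.Int.mod (a * s) p))  := by
    intro a
    apply pvImg_congr
    intro z
    exact (PySem.List.sorted_perm S (fun x => x) false).mem_iff
  have hone : pyFrozenset (S.map (fun s => PySem.Int.mod (1 * s) p)) = pyFrozenset S := by
    congr 1
    conv_rhs => rw [← List.map_id S]
    apply List.map_congr_left
    intro x hx
    have := hS x hx
    rw [one_mul, PySem.Int.mod_eq_emod_of_pos (by omega), Int.emod_eq_of_lt (by omega) (by omega)]; rfl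
  rw [mem_multiplicative_orbit]
  constructor
  · rintro (rfl | ⟨a, ha, hg, rfl⟩)
    · exact ⟨1, mem_pvUnits.mpr ⟨⟨le_refl _, by omega⟩, by simp⟩, by rw [himg, hone]⟩
    · have := PySem.List.mem_pyRange_one.mp ha
      exact ⟨a, mem_pvUnits.mpr ⟨⟨by omega, this.2⟩, hg⟩, by rw [himg]⟩
  · rintro ⟨a, ha, rfl⟩
    obtain ⟨⟨h1, h2⟩, hg⟩ := mem_pvUnits.mp ha
    by_cases ha1 : a = 1
    · subst ha1; rw [himg, hone]; exact Or.inl rfl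
    · exact Or.inr ⟨a, PySem.List.mem_pyRange_one.mpr ⟨by omega, h2⟩, hg, himg a⟩

-- ------- unit (group) facts -------

lemma unit_mul {p a b : Int} (ha : Int.gcd a p = 1) (hb : Int.gcd b p = 1) :
    Int.gcd (a * b) p = 1 := by
  rw [← Int.isCoprime_iff_gcd_eq_one] at *
  exact ha.mul_left hb

lemma unit_emod_mem {p a : Int} (hp : 2 ≤ p) (ha : Int.gcd a p = 1) :
    (a % p) ∈ pvUnits p := by
  have hg : Int.gcd (a % p) p = 1 := by
    rw [← Int.isCoprime_iff_gcd_eq_one] at *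
    have : a % p = a + p * (-(a / p)) := by
      rw [Int.emod_def]; ring
    rw [this]
    exact ha.add_mul_left_left _
  have h0 : 0 ≤ a % p := Int.emod_nonneg a (by omega)
  have h1 : a % p < p := Int.emod_lt_of_pos a (by omega)
  have hne : a % p ≠ 0 := by
    intro h
    rw [h] at hg
    simp [Int.gcd] at hg
    omega
  exact mem_pvUnits.mpr ⟨⟨by omega, h1⟩, hg⟩

lemma unit_inverse {p a : Int} (hp : 2 ≤ p) (ha : Int.gcd a p = 1) :
    ∃ b ∈ pvUnits p, (a * b) % p = 1 := by
  have hc : IsCoprime a p := Int.isCoprime_iff_gcd_eq_one.mpr ha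
  obtain ⟨u, v, huv⟩ := hc
  have hu : Int.gcd u p = 1 := by
    rw [← Int.isCoprime_iff_gcd_eq_one]
    exact ⟨a, v, by linarith [huv, mul_comm u a]⟩
  refine ⟨u % p, unit_emod_mem hp hu, ?_⟩
  have h1 : (a * (u % p)) % p = (a * u) % p := by
    rw [Int.mul_emod a (u % p) p, Int.emod_emod_of_dvd u dvd_rfl, ← Int.mul_emod]
  rw [h1]
  have h2 : a * u = 1 + p * (-v) := by linarith [mul_comm u a]
  rw [h2, Int.add_mul_emod_self_left]
  exact Int.emod_eq_of_lt (by omega) (by omega)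

-- ------- characterisation of B's canonical key as the minimum over candList -------

-- candidate list of S: one image per unit
def candList (p : Int) (S : List Int) : List (List Int) :=
  (pvUnits p).map (fun a => pvImg p a S)

lemma candList_cons {p : Int} (hp : 2 ≤ p) (S : List Int)
    (hb : ∀ x ∈ S, 0 ≤ x ∧ x < p) :
    candList p S = pyFrozenset S ::
      ((PySem.List.pyRange 2 p 1).filter (fun a => Int.gcd a p == 1)).map
        (fun a => pvImg p a S) := by
  unfold candList pvUnits
  rw [PySem.List.pyRange_one_cons (by omega)]
  have h1 : (Int.gcd 1 p == 1) = true := by simp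
  rw [List.filter_cons, if_pos h1, List.map_cons, pvImg_one (by omega) hb]
  norm_num

-- B's candidate expression computes exactly candList (table lookups never go out of range,
-- and the sorted image of a duplicate-free list is its frozenset)
lemma pvCanon_cands {p : Int} (hp : 2 ≤ p) {S : List Int}
    (hnd : S.Nodup) (hb : ∀ x ∈ S, 0 ≤ x ∧ x < p) :
    ((pvUnits p).map (fun a =>
        (PySem.List.pyRange 0 p 1).map (fun s => PySem.Int.mod (a * s) p))).map
      (fun t =>
        PySem.List.sorted (S.map (fun s => PySem.List.pyGetD t s 0)) (fun x => x) false)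
    = candList p S := by
  unfold candList
  rw [List.map_map]
  apply List.map_congr_left
  intro a ha
  obtain ⟨-, hga⟩ := mem_pvUnits.mp ha
  dsimp only [Function.comp]
  have hlookup : S.map (fun s =>
      PySem.List.pyGetD ((PySem.List.pyRange 0 p 1).map (fun s => PySem.Int.mod (a * s) p)) s 0)
      = S.map (fun s => PySem.Int.mod (a * s) p) := by
    apply List.map_congr_left
    intro s hs
    have := hb s hs
    exact PySem.List.pyGetD_map_pyRange_of_nonneg _ p s 0 this.1 this.2
  rw [hlookup, sorted_eq_pyFrozenset_of_nodup (nodup_image hp hga hnd hb)]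
  rfl

-- min over a nonempty list of lists (the instances here are the ones B's port elaborates with)
lemma pv_min?_cons (c : List Int) (t : List (List Int)) :
    PySem.List.min? (c :: t) (fun x => x) = some (t.foldl min c) := by
  unfold PySem.List.min?
  rw [List.foldl_cons]
  induction t generalizing c with
  | nil => rfl
  | cons x t ih =>
    rw [List.foldl_cons, List.foldl_cons]
    have hstep : (if x < c then some x else some c) = some (min c x) := by
      split_ifs with h
      · rw [min_eq_right h.le]
      · rw [min_eq_left (not_lt.mp h)]
    calc List.foldl _ (if x < c then some x else some c) t
        = List.foldl _ (some (min c x)) t := by rw [hstep]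
      _ = some (List.foldl min (min c x) t) := ih (min c x)

lemma pvCanon_foldl {p : Int} (hp : 2 ≤ p) {S : List Int}
    (hnd : S.Nodup) (hb : ∀ x ∈ S, 0 ≤ x ∧ x < p) :
    pvCanon p S = ((((PySem.List.pyRange 2 p 1).filter (fun a => Int.gcd a p == 1)).map
        (fun a => pvImg p a S))).foldl min (pyFrozenset S) := by
  unfold pvCanon
  rw [pvCanon_cands hp hnd hb, candList_cons hp S hb]
  rw [PySem.List.minD, pv_min?_cons]
  rfl

lemma pvCanon_mem {p : Int} (hp : 2 ≤ p) {S : List Int}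
    (hnd : S.Nodup) (hb : ∀ x ∈ S, 0 ≤ x ∧ x < p) :
    pvCanon p S ∈ candList p S := by
  rw [pvCanon_foldl hp hnd hb, candList_cons hp S hb]
  rcases PySem.List.foldl_min_mem (κ := List Int)
      (((PySem.List.pyRange 2 p 1).filter (fun a => Int.gcd a p == 1)).map
        (fun a => pvImg p a S)) (pyFrozenset S) with h | h
  · rw [h]; exact List.mem_cons_self ..
  · exact List.mem_cons_of_mem _ h

lemma pvCanon_le {p : Int} (hp : 2 ≤ p) {S : List Int}
    (hnd : S.Nodup) (hb : ∀ x ∈ S, 0 ≤ x ∧ x < p) :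
    ∀ c ∈ candList p S, pvCanon p S ≤ c := by
  rw [pvCanon_foldl hp hnd hb, candList_cons hp S hb]
  intro c hc
  have := PySem.List.foldl_min_le (κ := List Int)
      (((PySem.List.pyRange 2 p 1).filter (fun a => Int.gcd a p == 1)).map
        (fun a => pvImg p a S)) (pyFrozenset S)
  rcases List.mem_cons.mp hc with rfl | hc
  · exact this.1
  · exact this.2 c hc

-- the canonical key depends only on the set of elements
lemma pvCanon_congr {p : Int} (hp : 2 ≤ p) {S S' : List Int}
    (hnd : S.Nodup) (hb : ∀ x ∈ S, 0 ≤ x ∧ x < p)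
    (hnd' : S'.Nodup) (hb' : ∀ x ∈ S', 0 ≤ x ∧ x < p)
    (h : ∀ z, z ∈ S ↔ z ∈ S') : pvCanon p S = pvCanon p S' := by
  have hc : candList p S = candList p S' := by
    unfold candList
    apply List.map_congr_left
    intro a _
    exact pvImg_congr h
  apply le_antisymm
  · exact pvCanon_le hp hnd hb _ (hc ▸ pvCanon_mem hp hnd' hb')
  · exact pvCanon_le hp hnd' hb' _ (hc.symm ▸ pvCanon_mem hp hnd hb)

-- ------- the central lemma: shared orbit ⇔ equal canonical keys -------

-- if pyFrozenset S = pvImg p c r with c a unit, then candList p S ⊆ candList p r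
lemma candList_subset {p c : Int} (hp : 2 ≤ p) {S r : List Int}
    (hc : Int.gcd c p = 1) (h : pyFrozenset S = pvImg p c r) :
    ∀ T ∈ candList p S, T ∈ candList p r := by
  intro T hT
  unfold candList at hT ⊢
  simp only [List.mem_map] at hT ⊢
  obtain ⟨a, ha, rfl⟩ := hT
  obtain ⟨-, hga⟩ := mem_pvUnits.mp ha
  have hmem : ∀ z, z ∈ S ↔ z ∈ pvImg p c r := by
    intro z
    rw [← mem_pyFrozenset (l := S), h]
  refine ⟨(a * c) % p, unit_emod_mem hp (unit_mul hga hc), ?_⟩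
  rw [pvImg_emod (by omega), ← pvImg_comp (by omega), ← pvImg_congr hmem]

lemma orbit_iff_canonical {p : Int} (hp : 2 ≤ p) {S r : List Int}
    (hndS : S.Nodup) (hbS : ∀ x ∈ S, 0 ≤ x ∧ x < p)
    (hndr : r.Nodup) (hbr : ∀ x ∈ r, 0 ≤ x ∧ x < p) :
    (∃ a ∈ pvUnits p, pyFrozenset S = pvImg p a r) ↔ pvCanon p S = pvCanon p r := by
  constructor
  · rintro ⟨c, hcmem, h⟩
    obtain ⟨⟨hc1, hc2⟩, hgc⟩ := mem_pvUnits.mp hcmem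
    obtain ⟨d, hdmem, hcd⟩ := unit_inverse hp hgc
    obtain ⟨-, hgd⟩ := mem_pvUnits.mp hdmem
    have hrev : pyFrozenset r = pvImg p d S := by
      have hmem : ∀ z, z ∈ S ↔ z ∈ pvImg p c r := fun z => by
        rw [← mem_pyFrozenset (l := S), h]
      rw [pvImg_congr hmem, pvImg_comp (by omega), ← pvImg_emod (by omega) (d * c) r]
      have : (d * c) % p = 1 := by rw [mul_comm d c]; exact hcd
      rw [this, pvImg_one (by omega) hbr]
    have hsub1 := candList_subset hp hgc h
    have hsub2 := candList_subset hp hgd hrev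
    apply le_antisymm
    · exact pvCanon_le hp hndS hbS _ (hsub2 _ (pvCanon_mem hp hndr hbr))
    · exact pvCanon_le hp hndr hbr _ (hsub1 _ (pvCanon_mem hp hndS hbS))
  · intro hc
    have h1 := pvCanon_mem hp hndS hbS
    have h2 := pvCanon_mem hp hndr hbr
    unfold candList at h1 h2
    simp only [List.mem_map] at h1 h2
    obtain ⟨a₀, ha₀, hS0⟩ := h1
    obtain ⟨b₀, hb₀, hR0⟩ := h2
    obtain ⟨-, hga⟩ := mem_pvUnits.mp ha₀
    obtain ⟨-, hgb⟩ := mem_pvUnits.mp hb₀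
    obtain ⟨d, hdmem, had⟩ := unit_inverse hp hga
    obtain ⟨⟨-, -⟩, hgd⟩ := mem_pvUnits.mp hdmem
    have key : pvImg p a₀ S = pvImg p b₀ r := hS0.trans (hc.trans hR0.symm)
    refine ⟨(d * b₀) % p, unit_emod_mem hp (unit_mul hgd hgb), ?_⟩
    have hfroz : pyFrozenset S = pvImg p d (pvImg p a₀ S) := by
      rw [pvImg_comp (by omega), ← pvImg_emod (by omega) (d * a₀) S]
      have : (d * a₀) % p = 1 := by rw [mul_comm d a₀]; exact had
      rw [this, pvImg_one (by omega) hbS]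
    rw [hfroz, key, pvImg_comp (by omega), pvImg_emod (by omega)]

-- ------- the main loop invariant -------

lemma main_loop (p : Int) (hp : 2 ≤ p) (L : List (List Int))
    (hL : ∀ S ∈ L, (∀ x ∈ S, 1 ≤ x ∧ x < p) ∧ S.Nodup) :
    ∀ (seenA : PySem.Set (List Int)) (seenB : PySem.Set (List Int)) (reps : List (List Int)),
      (∀ r ∈ reps, (∀ x ∈ r, 1 ≤ x ∧ x < p) ∧ r.Nodup) →
      (∀ T, T ∈ seenA ↔ ∃ r ∈ reps, ∃ a ∈ pvUnits p, T = pvImg p a r) →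
      (∀ K, K ∈ seenB ↔ ∃ r ∈ reps, K = pvCanon p r) →
      (L.foldl
        (fun st S =>
          if PySem.Set.contains st.1 (pyFrozenset S) then st
          else
            let orbit := multiplicative_orbit p S
            (orbit.foldl (fun se m => PySem.Set.add se m) st.1,
             st.2 ++ [PySem.List.sorted S (fun x => x) false]))
        (seenA, reps)).2 =
      (L.foldl
        (fun st S =>
          let key := pvCanon p S
          if PySem.Set.contains st.1 key then st
          else (PySem.Set.add st.1 key, st.2 ++ [PySem.List.sorted S (fun x => x) false]))
        (seenB, reps)).2 := by
  induction L with
  | nil => intro seenA seenB reps _ _ _; rfl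
  | cons S rest ih =>
    intro seenA seenB reps hreps hinvA hinvB
    obtain ⟨hSb, hSnd⟩ := hL S (List.mem_cons_self ..)
    have hrest : ∀ S' ∈ rest, (∀ x ∈ S', 1 ≤ x ∧ x < p) ∧ S'.Nodup :=
      fun S' h => hL S' (List.mem_cons_of_mem _ h)
    have hSb0 : ∀ x ∈ S, 0 ≤ x ∧ x < p := fun x hx => by have := hSb x hx; omega
    have hsortS : ∀ z, z ∈ S ↔ z ∈ PySem.List.sorted S (fun x => x) false :=
      fun z => (PySem.List.sorted_perm S (fun x => x) false).mem_iff.symm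
    have hsortSb : ∀ x ∈ PySem.List.sorted S (fun x => x) false, 1 ≤ x ∧ x < p :=
      fun x hx => hSb x ((hsortS x).mpr hx)
    have hsortSnd : (PySem.List.sorted S (fun x => x) false).Nodup :=
      (PySem.List.sorted_perm S (fun x => x) false).nodup_iff.mpr hSnd
    simp only [List.foldl_cons]
    -- the two skip conditions coincide
    have hcond : PySem.Set.contains seenA (pyFrozenset S) =
        PySem.Set.contains seenB (pvCanon p S) := by
      have hiffA : PySem.Set.contains seenA (pyFrozenset S) = true ↔
          ∃ r ∈ reps, ∃ a ∈ pvUnits p, pyFrozenset S = pvImg p a r := by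
        rw [PySem.Set.contains_iff]; exact hinvA _
      have hiffB : PySem.Set.contains seenB (pvCanon p S) = true ↔
          ∃ r ∈ reps, pvCanon p S = pvCanon p r := by
        rw [PySem.Set.contains_iff]; exact hinvB _
      have hequiv : (∃ r ∈ reps, ∃ a ∈ pvUnits p, pyFrozenset S = pvImg p a r) ↔
          (∃ r ∈ reps, pvCanon p S = pvCanon p r) := by
        constructor
        · rintro ⟨r, hr, ha⟩
          obtain ⟨hrb, hrnd⟩ := hreps r hr
          exact ⟨r, hr, (orbit_iff_canonical hp hSnd hSb0 hrnd
            (fun x hx => by have := hrb x hx; omega)).mp ha⟩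
        · rintro ⟨r, hr, hcr⟩
          obtain ⟨hrb, hrnd⟩ := hreps r hr
          exact ⟨r, hr, (orbit_iff_canonical hp hSnd hSb0 hrnd
            (fun x hx => by have := hrb x hx; omega)).mpr hcr⟩
      rcases hB : PySem.Set.contains seenB (pvCanon p S) with _ | _
      · rw [Bool.eq_false_iff]
        intro hA
        have := hiffB.mpr (hequiv.mp (hiffA.mp hA))
        rw [hB] at this
        exact Bool.noConfusion this
      · exact hiffA.mpr (hequiv.mpr (hiffB.mp hB))
    rw [hcond]
    rcases h : PySem.Set.contains seenB (pvCanon p S) with _ | _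
    · rw [if_neg (by simp), if_neg (by simp)]
      apply ih hrest
      · intro r hr
        rcases List.mem_append.mp hr with hr | hr
        · exact hreps r hr
        · rw [List.mem_singleton] at hr; subst hr; exact ⟨hsortSb, hsortSnd⟩
      · intro T
        have hupd : (multiplicative_orbit p S).foldl (fun se m => PySem.Set.add se m) seenA =
            PySem.Set.update seenA (multiplicative_orbit p S) := rfl
        rw [hupd, PySem.Set.mem_update, hinvA T, orbit_eq_images hp hSb T]
        constructor
        · rintro (⟨r, hr, a, ha, rfl⟩ | ⟨a, ha, rfl⟩)
          · exact ⟨r, List.mem_append_left _ hr, a, ha, rfl⟩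
          · exact ⟨_, List.mem_append_right _ (List.mem_singleton_self _), a, ha, rfl⟩
        · rintro ⟨r, hr, a, ha, rfl⟩
          rcases List.mem_append.mp hr with hr | hr
          · exact Or.inl ⟨r, hr, a, ha, rfl⟩
          · rw [List.mem_singleton] at hr; subst hr
            exact Or.inr ⟨a, ha, rfl⟩
      · intro K
        rw [PySem.Set.mem_add, hinvB K]
        have hcS : pvCanon p (PySem.List.sorted S (fun x => x) false) = pvCanon p S :=
          pvCanon_congr hp hsortSnd (fun x hx => by have := hsortSb x hx; omega)
            hSnd hSb0 (fun z => (hsortS z).symm)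
        constructor
        · rintro (⟨r, hr, rfl⟩ | rfl)
          · exact ⟨r, List.mem_append_left _ hr, rfl⟩
          · exact ⟨_, List.mem_append_right _ (List.mem_singleton_self _), hcS.symm⟩
        · rintro ⟨r, hr, rfl⟩
          rcases List.mem_append.mp hr with hr | hr
          · exact Or.inl ⟨r, hr, rfl⟩
          · rw [List.mem_singleton] at hr; subst hr
            exact Or.inr hcS
    · rw [if_pos rfl, if_pos rfl]
      exact ih hrest seenA seenB reps hreps hinvA hinvB

-- the degenerate case p ≤ 1: all_S = [[]], both programs return [[]]
lemma small_p_case (p : Int) (hp : p ≤ 1) :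
    find_orbit_representatives p = find_orbit_representatives_alt p := by
  have h1 : PySem.List.pyRange 1 p 1 = [] := PySem.List.pyRange_one_eq_nil (by omega)
  have h2 : PySem.List.pyRange 2 p 1 = [] := PySem.List.pyRange_one_eq_nil (by omega)
  unfold find_orbit_representatives find_orbit_representatives_alt
    all_circulant_tournaments multiplicative_orbit
  rw [h1, h2]
  simp [pvPairsLoop, pyFrozenset, PySem.List.dedup, PySem.List.minD, PySem.List.min?,
    PySem.List.sorted, PySem.Set.ofList, PySem.Set.empty, PySem.Set.add, PySem.Set.contains,
    PySem.List.enumerate]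

-- ===== VERDICT (by name: the statement is the Claim_ definition above) =====
theorem find_orbit_representatives_spec : Claim_equal_find_orbit_representatives := by
  intro p _
  unfold Spec_find_orbit_representatives
  by_cases hp : p ≤ 1
  · exact small_p_case p hp
  · unfold find_orbit_representatives find_orbit_representatives_alt
    by_cases hS : all_circulant_tournaments p = []
    · rw [hS]; simp
    · rw [if_neg hS]
      exact main_loop p (by omega) (all_circulant_tournaments p)
        (fun S hS => ⟨all_S_bounds hS, all_S_nodup hS⟩) PySem.Set.empty PySem.Set.empty []
        (by simp) (by intro T; simp [PySem.Set.empty]) (by intro K; simp [PySem.Set.empty])
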